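-- pv_equiv track=rewrite | github.com/faraz1272/steam-discount-forecast | src/steam_sale/feature_builder.py | _map_tags_to_genre_clusters
-- ===== SOURCE A (Python) =====
-- def _map_tags_to_genre_clusters(tags: list[str]) -> dict[str, int]:
--     """
--     Converts ITAD tags into genre cluster binary flags.
--     """
--     tags_lower = [t.lower() for t in tags]
--
--     return {
--         "genre_cluster_strategy_sim_y": int(any(t in tags_lower for t in ["strategy", "simulation", "4x", "grand strategy"])),
--         "genre_cluster_mmo_y": int(any(t in tags_lower for t in ["mmo", "online", "multiplayer"])),
--         "genre_cluster_story_action_mainstream": int(any(t in tags_lower for t in ["action", "adventure", "story", "rpg"])),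
--         "genre_cluster_sports_competitive": int(any(t in tags_lower for t in ["sports", "racing", "competitive"])),
--     }
-- ===== SOURCE B (Python) =====
-- # B: single pass over the tags with a static reverse index from keyword to cluster key,
-- # replacing A's four repeated any()-scans over the tag list (different decomposition).
--
-- _REVERSE = {
--     "strategy": "genre_cluster_strategy_sim_y",
--     "simulation": "genre_cluster_strategy_sim_y",
--     "4x": "genre_cluster_strategy_sim_y",
--     "grand strategy": "genre_cluster_strategy_sim_y",
--     "mmo": "genre_cluster_mmo_y",
--     "online": "genre_cluster_mmo_y",
--     "multiplayer": "genre_cluster_mmo_y",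
--     "action": "genre_cluster_story_action_mainstream",
--     "adventure": "genre_cluster_story_action_mainstream",
--     "story": "genre_cluster_story_action_mainstream",
--     "rpg": "genre_cluster_story_action_mainstream",
--     "sports": "genre_cluster_sports_competitive",
--     "racing": "genre_cluster_sports_competitive",
--     "competitive": "genre_cluster_sports_competitive",
-- }
--
--
-- def _map_tags_to_genre_clusters(tags: list[str]) -> dict[str, int]:
--     res = {
--         "genre_cluster_strategy_sim_y": 0,
--         "genre_cluster_mmo_y": 0,
--         "genre_cluster_story_action_mainstream": 0,
--         "genre_cluster_sports_competitive": 0,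
--     }
--     for t in tags:
--         k = _REVERSE.get(t.lower())
--         if k is not None:
--             res[k] = 1
--     return res
-- ===== Notes on version B (the rewrite author's own statement) =====
-- stated objective: faster
-- what changed: Replaces A's four any()-scans over the lowercased tag list (one per cluster) by one single pass over the tags with a static keyword-to-cluster reverse-index dict that sets the matching flag.
import Mathlib
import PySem

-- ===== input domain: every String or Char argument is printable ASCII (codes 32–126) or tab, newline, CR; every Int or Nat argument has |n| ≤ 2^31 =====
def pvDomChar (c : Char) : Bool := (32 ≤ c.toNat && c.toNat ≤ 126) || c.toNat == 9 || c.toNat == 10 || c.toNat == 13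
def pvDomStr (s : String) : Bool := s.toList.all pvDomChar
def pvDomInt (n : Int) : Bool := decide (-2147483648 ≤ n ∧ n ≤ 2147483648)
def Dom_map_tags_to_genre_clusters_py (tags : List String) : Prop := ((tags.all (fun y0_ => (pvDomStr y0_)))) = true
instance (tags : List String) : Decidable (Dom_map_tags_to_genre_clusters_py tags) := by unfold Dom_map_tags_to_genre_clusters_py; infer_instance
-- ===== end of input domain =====

-- B replaces A's four any()-scans over the lowered tag list by one pass over the tags
-- with a static keyword→cluster reverse-index dict (objective: faster, constant factor).

-- ===== PORT A =====
def map_tags_to_genre_clusters_py (tags : List String) : List (String × Int) :=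
  let tags_lower := tags.map (fun t => PySem.Str.lower t)
  [("genre_cluster_strategy_sim_y",
      if ["strategy", "simulation", "4x", "grand strategy"].any (fun t => tags_lower.contains t) then (1 : Int) else 0),
   ("genre_cluster_mmo_y",
      if ["mmo", "online", "multiplayer"].any (fun t => tags_lower.contains t) then (1 : Int) else 0),
   ("genre_cluster_story_action_mainstream",
      if ["action", "adventure", "story", "rpg"].any (fun t => tags_lower.contains t) then (1 : Int) else 0),
   ("genre_cluster_sports_competitive",
      if ["sports", "racing", "competitive"].any (fun t => tags_lower.contains t) then (1 : Int) else 0)]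

-- ===== PORT B =====
-- the module-level _REVERSE dict of Source B
def pvRev : PySem.Dict String String := PySem.Dict.ofList
  [("strategy", "genre_cluster_strategy_sim_y"),
   ("simulation", "genre_cluster_strategy_sim_y"),
   ("4x", "genre_cluster_strategy_sim_y"),
   ("grand strategy", "genre_cluster_strategy_sim_y"),
   ("mmo", "genre_cluster_mmo_y"),
   ("online", "genre_cluster_mmo_y"),
   ("multiplayer", "genre_cluster_mmo_y"),
   ("action", "genre_cluster_story_action_mainstream"),
   ("adventure", "genre_cluster_story_action_mainstream"),
   ("story", "genre_cluster_story_action_mainstream"),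
   ("rpg", "genre_cluster_story_action_mainstream"),
   ("sports", "genre_cluster_sports_competitive"),
   ("racing", "genre_cluster_sports_competitive"),
   ("competitive", "genre_cluster_sports_competitive")]

-- loop body of Source B: k = _REVERSE.get(t.lower()); if k is not None: res[k] = 1
def pvClusterStep (res : PySem.Dict String Int) (t : String) : PySem.Dict String Int :=
  match pvRev.get? (PySem.Str.lower t) with
  | some k => res.insert k 1
  | none => res

def map_tags_to_genre_clusters_py_alt (tags : List String) : List (String × Int) :=
  (tags.foldl pvClusterStep (PySem.Dict.ofList
    [("genre_cluster_strategy_sim_y", 0),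
     ("genre_cluster_mmo_y", 0),
     ("genre_cluster_story_action_mainstream", 0),
     ("genre_cluster_sports_competitive", 0)])).items

-- ===== PRECONDITION & SPEC =====
def Spec_map_tags_to_genre_clusters_py (tags : List String) (out : List (String × Int)) : Prop := out = map_tags_to_genre_clusters_py_alt tags
instance (tags : List String) (out : List (String × Int)) : Decidable (Spec_map_tags_to_genre_clusters_py tags out) := by unfold Spec_map_tags_to_genre_clusters_py; infer_instance

-- ===== CLAIM (what is proved, stated in full; the proofs are below) =====
def Claim_equal_map_tags_to_genre_clusters_py : Prop := ∀ (tags : List String), Dom_map_tags_to_genre_clusters_py tags → Spec_map_tags_to_genre_clusters_py tags (map_tags_to_genre_clusters_py tags)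

-- ===== LEMMAS AND PROOFS =====

-- one loop step sets exactly the flag of the cluster containing the lowered tag
theorem pvClusterStep_eq (s : String) (x1 x2 x3 x4 : Int) :
    pvClusterStep (PySem.Dict.mk
      [("genre_cluster_strategy_sim_y", x1),
       ("genre_cluster_mmo_y", x2),
       ("genre_cluster_story_action_mainstream", x3),
       ("genre_cluster_sports_competitive", x4)]) s =
    PySem.Dict.mk
      [("genre_cluster_strategy_sim_y",
          if ["strategy", "simulation", "4x", "grand strategy"].contains (PySem.Str.lower s) then 1 else x1),
       ("genre_cluster_mmo_y",
          if ["mmo", "online", "multiplayer"].contains (PySem.Str.lower s) then 1 else x2),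
       ("genre_cluster_story_action_mainstream",
          if ["action", "adventure", "story", "rpg"].contains (PySem.Str.lower s) then 1 else x3),
       ("genre_cluster_sports_competitive",
          if ["sports", "racing", "competitive"].contains (PySem.Str.lower s) then 1 else x4)] := by
  unfold pvClusterStep
  generalize PySem.Str.lower s = w
  by_cases e1 : w = "strategy"; · subst e1; rfl
  by_cases e2 : w = "simulation"; · subst e2; rfl
  by_cases e3 : w = "4x"; · subst e3; rfl
  by_cases e4 : w = "grand strategy"; · subst e4; rfl
  by_cases e5 : w = "mmo"; · subst e5; rfl
  by_cases e6 : w = "online"; · subst e6; rfl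
  by_cases e7 : w = "multiplayer"; · subst e7; rfl
  by_cases e8 : w = "action"; · subst e8; rfl
  by_cases e9 : w = "adventure"; · subst e9; rfl
  by_cases e10 : w = "story"; · subst e10; rfl
  by_cases e11 : w = "rpg"; · subst e11; rfl
  by_cases e12 : w = "sports"; · subst e12; rfl
  by_cases e13 : w = "racing"; · subst e13; rfl
  by_cases e14 : w = "competitive"; · subst e14; rfl
  have hrev : pvRev = PySem.Dict.mk
      [("strategy", "genre_cluster_strategy_sim_y"),
       ("simulation", "genre_cluster_strategy_sim_y"),
       ("4x", "genre_cluster_strategy_sim_y"),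
       ("grand strategy", "genre_cluster_strategy_sim_y"),
       ("mmo", "genre_cluster_mmo_y"),
       ("online", "genre_cluster_mmo_y"),
       ("multiplayer", "genre_cluster_mmo_y"),
       ("action", "genre_cluster_story_action_mainstream"),
       ("adventure", "genre_cluster_story_action_mainstream"),
       ("story", "genre_cluster_story_action_mainstream"),
       ("rpg", "genre_cluster_story_action_mainstream"),
       ("sports", "genre_cluster_sports_competitive"),
       ("racing", "genre_cluster_sports_competitive"),
       ("competitive", "genre_cluster_sports_competitive")] := by decide
  have g : pvRev.get? w = none := by
    rw [hrev]
    simp [PySem.Dict.get?, Ne.symm e1, Ne.symm e2, Ne.symm e3, Ne.symm e4, Ne.symm e5,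
      Ne.symm e6, Ne.symm e7, Ne.symm e8, Ne.symm e9, Ne.symm e10, Ne.symm e11, Ne.symm e12,
      Ne.symm e13, Ne.symm e14]
  rw [g]
  simp [List.contains_eq_mem, e1, e2, e3, e4, e5, e6, e7, e8, e9, e10, e11, e12, e13, e14]

theorem pv_ite_or (a b : Bool) (x : Int) :
    (if b then (1 : Int) else if a then 1 else x) = if (a || b) then 1 else x := by
  cases a <;> cases b <;> simp

-- the loop invariant: folding Source B's loop over l sets each flag iff some tag of l lowers into that cluster
theorem pvFold_eq (l : List String) (x1 x2 x3 x4 : Int) :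
    l.foldl pvClusterStep (PySem.Dict.mk
      [("genre_cluster_strategy_sim_y", x1),
       ("genre_cluster_mmo_y", x2),
       ("genre_cluster_story_action_mainstream", x3),
       ("genre_cluster_sports_competitive", x4)]) =
    PySem.Dict.mk
      [("genre_cluster_strategy_sim_y",
          if l.any (fun t => ["strategy", "simulation", "4x", "grand strategy"].contains (PySem.Str.lower t)) then 1 else x1),
       ("genre_cluster_mmo_y",
          if l.any (fun t => ["mmo", "online", "multiplayer"].contains (PySem.Str.lower t)) then 1 else x2),
       ("genre_cluster_story_action_mainstream",
          if l.any (fun t => ["action", "adventure", "story", "rpg"].contains (PySem.Str.lower t)) then 1 else x3),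
       ("genre_cluster_sports_competitive",
          if l.any (fun t => ["sports", "racing", "competitive"].contains (PySem.Str.lower t)) then 1 else x4)] := by
  induction l generalizing x1 x2 x3 x4 with
  | nil => simp
  | cons t l ih =>
    rw [List.foldl_cons, pvClusterStep_eq, ih]
    simp only [List.any_cons, pv_ite_or]
    rfl

-- any(w in L for w in c) scans may be flipped into a scan of L
theorem pv_any_contains_comm (c L : List String) :
    c.any (fun w => L.contains w) = L.any (fun t => c.contains t) := by
  by_cases h : ∃ w ∈ c, w ∈ L
  · obtain ⟨w, hc, hL⟩ := h
    have h1 : c.any (fun w => L.contains w) = true := by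
      simp only [List.any_eq_true]; exact ⟨w, hc, by simpa using hL⟩
    have h2 : L.any (fun t => c.contains t) = true := by
      simp only [List.any_eq_true]; exact ⟨w, hL, by simpa using hc⟩
    rw [h1, h2]
  · have h1 : c.any (fun w => L.contains w) = false := by
      simp only [List.any_eq_false]; intro w hc hL
      exact h ⟨w, hc, by simpa using hL⟩
    have h2 : L.any (fun t => c.contains t) = false := by
      simp only [List.any_eq_false]; intro t hL hc
      exact h ⟨t, by simpa using hc, hL⟩
    rw [h1, h2]

-- ===== VERDICT (by name: the statement is the Claim_ definition above) =====
set_option maxHeartbeats 1000000 in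
theorem map_tags_to_genre_clusters_py_spec : Claim_equal_map_tags_to_genre_clusters_py := by
  intro tags _
  simp only [Spec_map_tags_to_genre_clusters_py, map_tags_to_genre_clusters_py,
    map_tags_to_genre_clusters_py_alt]
  have hinit : PySem.Dict.ofList
      ([("genre_cluster_strategy_sim_y", 0),
        ("genre_cluster_mmo_y", 0),
        ("genre_cluster_story_action_mainstream", 0),
        ("genre_cluster_sports_competitive", 0)] : List (String × Int)) =
      PySem.Dict.mk
      [("genre_cluster_strategy_sim_y", 0),
       ("genre_cluster_mmo_y", 0),
       ("genre_cluster_story_action_mainstream", 0),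
       ("genre_cluster_sports_competitive", 0)] := by decide
  rw [hinit, pvFold_eq]
  have q1 := pv_any_contains_comm ["strategy", "simulation", "4x", "grand strategy"]
    (tags.map (fun t => PySem.Str.lower t))
  have q2 := pv_any_contains_comm ["mmo", "online", "multiplayer"]
    (tags.map (fun t => PySem.Str.lower t))
  have q3 := pv_any_contains_comm ["action", "adventure", "story", "rpg"]
    (tags.map (fun t => PySem.Str.lower t))
  have q4 := pv_any_contains_comm ["sports", "racing", "competitive"]
    (tags.map (fun t => PySem.Str.lower t))
  rw [q1, q2, q3, q4]
  simp only [List.any_map, Function.comp_def]
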